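-- pv_equiv track=rewrite | github.com/Wulfic/Cicada3301 | tools/archive/extract_top_results.py | decrypt_interleaved
-- ===== SOURCE A (Python) =====
-- NUM_RUNES = 29
--
-- def decrypt_interleaved(indices, key, rot1, rot2, offset=0):
--     """Decrypt using two alternating rotations of the key."""
--     result = []
--     key_len = len(key)
--     for i, idx in enumerate(indices):
--         rotation = rot1 if i % 2 == 0 else rot2
--         key_val = key[(i + rotation) % key_len]
--         plain_idx = (idx - key_val - offset) % NUM_RUNES
--         result.append(plain_idx)
--     return result
-- ===== SOURCE B (Python) =====
-- NUM_RUNES = 29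
--
-- def decrypt_interleaved(indices, key, rot1, rot2, offset=0):
--     """Decrypt by splitting into even/odd positions, then interleaving back."""
--     key_len = len(key)
--     evens = [(idx - key[(2 * j + rot1) % key_len] - offset) % NUM_RUNES
--              for j, idx in enumerate(indices[0::2])]
--     odds = [(idx - key[(2 * j + 1 + rot2) % key_len] - offset) % NUM_RUNES
--             for j, idx in enumerate(indices[1::2])]
--     out = []
--     for e, o in zip(evens, odds):
--         out.append(e)
--         out.append(o)
--     if len(evens) > len(odds):
--         out.append(evens[-1])
--     return out
-- ===== Notes on version B (the rewrite author's own statement) =====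
-- stated objective: alternative
-- what changed: Instead of one loop branching on index parity per element, B slices the input into even-position and odd-position halves, decrypts each half independently with its fixed rotation, and interleaves the two result lists back (appending the leftover even element when the count is odd).
import Mathlib
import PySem

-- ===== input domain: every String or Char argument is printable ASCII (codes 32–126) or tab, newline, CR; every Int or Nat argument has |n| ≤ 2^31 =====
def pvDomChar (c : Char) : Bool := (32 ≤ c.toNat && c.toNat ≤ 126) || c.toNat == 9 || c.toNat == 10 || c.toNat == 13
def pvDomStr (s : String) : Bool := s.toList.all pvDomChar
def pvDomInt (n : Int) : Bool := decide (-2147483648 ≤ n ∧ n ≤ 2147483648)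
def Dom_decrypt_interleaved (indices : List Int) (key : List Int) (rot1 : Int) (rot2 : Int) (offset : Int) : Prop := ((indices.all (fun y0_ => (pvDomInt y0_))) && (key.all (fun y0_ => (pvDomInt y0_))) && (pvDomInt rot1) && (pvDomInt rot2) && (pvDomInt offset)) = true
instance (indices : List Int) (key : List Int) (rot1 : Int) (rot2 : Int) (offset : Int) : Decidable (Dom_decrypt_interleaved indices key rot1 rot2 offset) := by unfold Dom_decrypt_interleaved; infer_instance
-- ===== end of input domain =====

-- B splits the input by position parity, decrypts each half with its own rotation, and
-- interleaves the halves back (objective: alternative decomposition, same cost).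

-- ===== PORT A =====
def decrypt_interleaved (indices : List Int) (key : List Int) (rot1 : Int) (rot2 : Int) (offset : Int) : List Int :=
  let key_len : Int := key.length
  (PySem.List.enumerate indices).foldl (fun result p =>
    let rotation := if PySem.Int.mod p.1 2 = 0 then rot1 else rot2
    let key_val := (PySem.List.pyGet? key (PySem.Int.mod (p.1 + rotation) key_len)).getD 0
    result ++ [PySem.Int.mod (p.2 - key_val - offset) 29]) []

-- ===== PORT B =====
def decrypt_interleaved_alt (indices : List Int) (key : List Int) (rot1 : Int) (rot2 : Int) (offset : Int) : List Int :=
  let key_len : Int := key.length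
  let evens := (PySem.List.enumerate ((PySem.List.slice? indices (some 0) none 2).getD [])).map
    (fun p => PySem.Int.mod (p.2 - (PySem.List.pyGet? key (PySem.Int.mod (2 * p.1 + rot1) key_len)).getD 0 - offset) 29)
  let odds := (PySem.List.enumerate ((PySem.List.slice? indices (some 1) none 2).getD [])).map
    (fun p => PySem.Int.mod (p.2 - (PySem.List.pyGet? key (PySem.Int.mod (2 * p.1 + 1 + rot2) key_len)).getD 0 - offset) 29)
  let out := (evens.zip odds).foldl (fun acc p => acc ++ [p.1, p.2]) []
  if odds.length < evens.length then out ++ [PySem.List.pyGetD evens (-1) 0] else out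

-- ===== PRECONDITION & SPEC =====
-- Pre_ excludes only the inputs where the Python A raises ZeroDivisionError ('% key_len' with
-- an empty key and a nonempty indices list); B raises there too.
def Pre_decrypt_interleaved (indices : List Int) (key : List Int) (rot1 : Int) (rot2 : Int) (offset : Int) : Prop :=
  indices = [] ∨ key ≠ []
instance (indices : List Int) (key : List Int) (rot1 : Int) (rot2 : Int) (offset : Int) : Decidable (Pre_decrypt_interleaved indices key rot1 rot2 offset) := by unfold Pre_decrypt_interleaved; infer_instance

def pvWitness_decrypt_interleaved : List Int × List Int × Int × Int × Int := ([5, 7, 11], [1, 2], 1, 2, 3)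

def Spec_decrypt_interleaved (indices : List Int) (key : List Int) (rot1 : Int) (rot2 : Int) (offset : Int) (out : List Int) : Prop := out = decrypt_interleaved_alt indices key rot1 rot2 offset
instance (indices : List Int) (key : List Int) (rot1 : Int) (rot2 : Int) (offset : Int) (out : List Int) : Decidable (Spec_decrypt_interleaved indices key rot1 rot2 offset out) := by unfold Spec_decrypt_interleaved; infer_instance

-- ===== CLAIM (what is proved, stated in full; the proofs are below) =====
def Claim_equal_decrypt_interleaved : Prop := ∀ (indices : List Int) (key : List Int) (rot1 : Int) (rot2 : Int) (offset : Int), Dom_decrypt_interleaved indices key rot1 rot2 offset → Pre_decrypt_interleaved indices key rot1 rot2 offset → Spec_decrypt_interleaved indices key rot1 rot2 offset (decrypt_interleaved indices key rot1 rot2 offset)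

-- ===== LEMMAS AND PROOFS =====

-- structural even/odd position split: (eo xs).1 = xs[0::2], (eo xs).2 = xs[1::2]
def eo {α : Type} : List α → List α × List α
  | [] => ([], [])
  | x :: r => (x :: (eo r).2, (eo r).1)

-- interleave two lists, first list first
def weave {α : Type} : List α → List α → List α
  | [], _ => []
  | x :: _, [] => [x]
  | x :: xs, y :: ys => x :: y :: weave xs ys

lemma eo_getElem? {α : Type} (xs : List α) (k : Nat) :
    (eo xs).1[k]? = xs[2 * k]? ∧ (eo xs).2[k]? = xs[2 * k + 1]? := by
  induction xs generalizing k with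
  | nil => simp [eo]
  | cons x r ih =>
    refine ⟨?_, ?_⟩
    · cases k with
      | zero => simp [eo]
      | succ k =>
        have h := (ih k).2
        have e : 2 * (k + 1) = 2 * k + 1 + 1 := by omega
        simp only [eo, List.getElem?_cons_succ, e]
        exact h
    · simpa only [eo, List.getElem?_cons_succ] using (ih k).1

lemma eo_len {α : Type} (xs : List α) :
    (eo xs).1.length = (xs.length + 1) / 2 ∧ (eo xs).2.length = xs.length / 2 := by
  induction xs with
  | nil => simp [eo]
  | cons x r ih =>
    refine ⟨?_, ?_⟩
    · simp only [eo, List.length_cons, ih.2]; omega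
    · simp only [eo, List.length_cons, ih.1]

lemma slice2_even (xs : List Int) :
    (PySem.List.slice? xs (some 0) none 2).getD [] = (eo xs).1 := by
  simp only [PySem.List.slice?, PySem.List.sliceIndices]
  norm_num
  have hc : (if 0 < xs.length then (((xs.length : Int) + 2 - 1) / 2).toNat else 0)
      = (xs.length + 1) / 2 := by split <;> omega
  rw [hc]
  have hmap : ∀ k ∈ List.range ((xs.length + 1) / 2),
      xs[(2 * (k : Int)).toNat]? = some (xs.getD (2 * k) 0) := by
    intro k hk
    have hk' : k < (xs.length + 1) / 2 := List.mem_range.mp hk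
    have hb : 2 * k < xs.length := by omega
    have ht : (2 * (k : Int)).toNat = 2 * k := by omega
    rw [ht, List.getElem?_eq_getElem hb, List.getD_eq_getElem xs 0 hb]
  rw [List.filterMap_congr hmap]
  rw [show (fun x => some (xs.getD (2 * x) 0)) = some ∘ (fun x => xs.getD (2 * x) 0) from rfl, List.filterMap_eq_map]
  apply List.ext_getElem?
  intro k
  rw [(eo_getElem? xs k).1, List.getElem?_map]
  by_cases h : k < (xs.length + 1) / 2
  · rw [List.getElem?_range h, List.getElem?_eq_getElem (by omega : 2 * k < xs.length)]
    simp [List.getElem?_eq_getElem (by omega : 2 * k < xs.length)]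
  · rw [List.getElem?_eq_none (by simpa using h), List.getElem?_eq_none (by omega : xs.length ≤ 2 * k)]
    rfl

lemma slice2_odd (xs : List Int) :
    (PySem.List.slice? xs (some 1) none 2).getD [] = (eo xs).2 := by
  cases xs with
  | nil => rfl
  | cons x r =>
    simp only [PySem.List.slice?, PySem.List.sliceIndices]
    norm_num
    have hc : (if 0 < r.length then (((r.length : Int) + 2 - 1) / 2).toNat else 0)
        = (r.length + 1) / 2 := by split <;> omega
    rw [hc]
    have hmap : ∀ k ∈ List.range ((r.length + 1) / 2),
        (x :: r)[(1 + 2 * (k : Int)).toNat]? = some (r.getD (2 * k) 0) := by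
      intro k hk
      have hk' : k < (r.length + 1) / 2 := List.mem_range.mp hk
      have hb : 2 * k < r.length := by omega
      have ht : (1 + 2 * (k : Int)).toNat = 2 * k + 1 := by omega
      rw [ht, List.getElem?_cons_succ, List.getElem?_eq_getElem hb, List.getD_eq_getElem r 0 hb]
    rw [List.filterMap_congr hmap]
    rw [show (fun k => some (r.getD (2 * k) 0)) = some ∘ (fun k => r.getD (2 * k) 0) from rfl, List.filterMap_eq_map]
    have : (eo (x :: r)).2 = (eo r).1 := by simp [eo]
    rw [this]
    apply List.ext_getElem?
    intro k
    rw [(eo_getElem? r k).1, List.getElem?_map]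
    by_cases h : k < (r.length + 1) / 2
    · rw [List.getElem?_range h, List.getElem?_eq_getElem (by omega : 2 * k < r.length)]
      simp [List.getElem?_eq_getElem (by omega : 2 * k < r.length)]
    · rw [List.getElem?_eq_none (by simpa using h), List.getElem?_eq_none (by omega : r.length ≤ 2 * k)]
      rfl

-- appending pairwise then the leftover head element is the interleave of the two halves
lemma flat_zip_weave (E O : List Int) (h1 : O.length ≤ E.length) (h2 : E.length ≤ O.length + 1) :
    ((E.zip O).flatMap (fun p => [p.1, p.2]) ++
      if O.length < E.length then [PySem.List.pyGetD E (-1) 0] else []) = weave E O := by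
  induction E generalizing O with
  | nil =>
    have : O = [] := by simpa using h1
    subst this; simp [weave]
  | cons x E' ih =>
    cases O with
    | nil =>
      have : E' = [] := by simpa using h2
      subst this
      simp [weave, PySem.List.pyGetD_neg_one [x] 0 (by simp)]
    | cons y O' =>
      have h1' : O'.length ≤ E'.length := by simp at h1; omega
      have h2' : E'.length ≤ O'.length + 1 := by simp at h2; omega
      have hlast : (if O'.length < E'.length then [PySem.List.pyGetD (x :: E') (-1) 0] else [])
          = (if O'.length < E'.length then [PySem.List.pyGetD E' (-1) 0] else []) := by
        split
        · next hlt =>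
          have hne : E' ≠ [] := by
            intro hE; subst hE; simp at hlt
          rw [PySem.List.pyGetD_neg_one (x :: E') 0 (by simp),
              PySem.List.pyGetD_neg_one E' 0 hne]
          simp [List.getLast_cons hne]
        · rfl
      simp only [List.zip_cons_cons, List.flatMap_cons, List.length_cons]
      simp only [Nat.add_lt_add_iff_right]
      rw [hlast]
      simp only [weave, List.cons_append, List.nil_append]
      rw [ih O' h1' h2']

-- the common element function, at even global position 2*j resp. odd position 2*j+1
lemma main_weave (key : List Int) (rot1 rot2 offset klen : Int) :
    ∀ (n : Nat) (xs : List Int), xs.length ≤ n → ∀ (j : Int),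
    (PySem.List.enumerate xs (2 * j)).map (fun p =>
        PySem.Int.mod (p.2 - (PySem.List.pyGet? key (PySem.Int.mod (p.1 + (if PySem.Int.mod p.1 2 = 0 then rot1 else rot2)) klen)).getD 0 - offset) 29)
      = weave
        ((PySem.List.enumerate (eo xs).1 j).map (fun p =>
          PySem.Int.mod (p.2 - (PySem.List.pyGet? key (PySem.Int.mod (2 * p.1 + rot1) klen)).getD 0 - offset) 29))
        ((PySem.List.enumerate (eo xs).2 j).map (fun p =>
          PySem.Int.mod (p.2 - (PySem.List.pyGet? key (PySem.Int.mod (2 * p.1 + 1 + rot2) klen)).getD 0 - offset) 29)) := by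
  intro n
  induction n with
  | zero =>
    intro xs hlen j
    have : xs = [] := List.length_eq_zero_iff.mp (by omega)
    subst this
    simp [eo, weave, PySem.List.enumerate_nil]
  | succ n ih =>
    intro xs hlen j
    match xs with
    | [] => simp [eo, weave, PySem.List.enumerate_nil]
    | [x] =>
      have hb : PySem.Int.mod (2 * j) 2 = 0 := (PySem.Int.mod_eq_zero_iff_dvd _ _).mpr ⟨j, rfl⟩
      simp [eo, weave, PySem.List.enumerate_cons, PySem.List.enumerate_nil]
    | x :: y :: r =>
      have hlen' : r.length ≤ n := by simp at hlen; omega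
      have heven : PySem.Int.mod (2 * j) 2 = 0 := (PySem.Int.mod_eq_zero_iff_dvd _ _).mpr ⟨j, rfl⟩
      have hodd : ¬ PySem.Int.mod (2 * j + 1) 2 = 0 := by
        rw [PySem.Int.mod_eq_zero_iff_dvd]
        omega
      have hstep : (2 * j + 1 + 1 : Int) = 2 * (j + 1) := by ring
      simp only [eo, PySem.List.enumerate_cons, List.map_cons, weave, heven, hodd, if_true,
        if_false, hstep]
      rw [ih r hlen' (j + 1)]

lemma ite_append_single (c : Prop) [inst : Decidable c] (F : List Int) (z : Int) :
    (if c then F ++ [z] else F) = F ++ (if c then [z] else []) := by split <;> simp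

-- ===== VERDICT (by name: the statement is the Claim_ definition above) =====
theorem decrypt_interleaved_spec : Claim_equal_decrypt_interleaved := by
  intro indices key rot1 rot2 offset _ _
  unfold Spec_decrypt_interleaved decrypt_interleaved decrypt_interleaved_alt
  simp only [PySem.List.foldl_append_singleton_eq_map, PySem.List.foldl_append_eq_flatMap,
    slice2_even, slice2_odd, List.nil_append]
  rw [show PySem.List.enumerate indices = PySem.List.enumerate indices (2 * 0) from rfl]
  rw [main_weave key rot1 rot2 offset (key.length : Int) indices.length indices le_rfl 0]
  rw [ite_append_single]
  refine (flat_zip_weave _ _ ?_ ?_).symm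
  · simp [PySem.List.length_enumerate, (eo_len indices).1, (eo_len indices).2]
    omega
  · simp [PySem.List.length_enumerate, (eo_len indices).1, (eo_len indices).2]
    omega
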